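-- pv_equiv track=rewrite | github.com/rxdcxdrnine/problem-solving | python/boj/BOJ_2805.py | solution
-- ===== SOURCE A (Python) =====
-- from typing import List
--
-- def solution(trees: List[int], M: int) -> int:
--
--     def determination(value: int) -> bool:
--         total: int = 0
--
--         for tree in trees:
--             if tree > value:
--                 total += tree - value
--
--         return total >= M
--
--     def binary_search(left: int, right: int) -> int:
--         answer: int = 0
--
--         while left <= right:
--             mid: int = (left + right) // 2
--             if determination(mid):
--                 answer = mid
--                 left = mid + 1
--             else:
--                 right = mid - 1
--
--         return answer
--
--     return binary_search(0, 1_000_000_000)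
-- ===== SOURCE B (Python) =====
-- from typing import List
--
-- def solution(trees: List[int], M: int) -> int:
--     # Sort once + prefix sums for O(log n) determinations; find the cut by
--     # binary lifting (bit descent) instead of a left/right interval search.
--     s = sorted(trees)
--     n = len(s)
--     pref = [0]
--     for t in s:
--         pref.append(pref[-1] + t)
--
--     def _bisect_right(v: int) -> int:
--         # textbook bisect.bisect_right(s, v) (bisect is not importable here:
--         # the original module imports only typing)
--         lo, hi = 0, n
--         while lo < hi:
--             mid = (lo + hi) // 2
--             if s[mid] <= v:
--                 lo = mid + 1
--             else:
--                 hi = mid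
--         return lo
--
--     def enough(v: int) -> bool:
--         k = _bisect_right(v)
--         return pref[n] - pref[k] - v * (n - k) >= M
--
--     answer = 0
--     step = 1 << 30
--     while step:
--         nxt = answer + step
--         if nxt <= 1_000_000_000 and enough(nxt):
--             answer = nxt
--         step >>= 1
--     return answer
-- ===== Notes on version B (the rewrite author's own statement) =====
-- stated objective: faster
-- what changed: B sorts the trees once and builds a prefix-sum table so each determination is a bisect plus O(1) arithmetic instead of a full scan, and replaces A's left/right interval binary search by a binary-lifting (bit-descent) construction of the answer.
import Mathlib
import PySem

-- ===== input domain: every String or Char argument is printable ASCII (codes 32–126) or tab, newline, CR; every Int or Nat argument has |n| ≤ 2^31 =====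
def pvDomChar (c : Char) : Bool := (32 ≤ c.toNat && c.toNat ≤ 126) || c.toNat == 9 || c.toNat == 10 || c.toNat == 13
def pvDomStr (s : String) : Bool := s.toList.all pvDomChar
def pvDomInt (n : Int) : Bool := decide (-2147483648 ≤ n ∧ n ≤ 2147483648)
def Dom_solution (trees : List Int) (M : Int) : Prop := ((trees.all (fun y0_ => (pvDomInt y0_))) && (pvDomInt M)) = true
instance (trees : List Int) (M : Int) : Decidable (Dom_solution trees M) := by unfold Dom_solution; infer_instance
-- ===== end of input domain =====

-- B replaces A's per-query O(n) scan by a one-time sort + prefix-sum table with a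
-- bisect per query, and A's left/right interval binary search by a bit-descent
-- (binary lifting) construction of the answer.

-- ===== PORT A =====
-- A's inner `determination(value)`: scan all trees, add tree - value for trees above value.
def detA (trees : List Int) (M : Int) (value : Int) : Bool :=
  decide (trees.foldl (fun total tree => if tree > value then total + (tree - value) else total) 0 ≥ M)

-- A's `binary_search` while-loop (state: left, right, answer).
def bsA (trees : List Int) (M : Int) (left right answer : Int) : Int :=
  if h : left ≤ right then
    let mid := PySem.Int.floordiv (left + right) 2
    if detA trees M mid then bsA trees M (mid + 1) right mid
    else bsA trees M left (mid - 1) answer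
  else answer
termination_by (right + 1 - left).toNat
decreasing_by
  · have := PySem.Int.floordiv_two_mid_bounds h; omega
  · have := PySem.Int.floordiv_two_mid_bounds h; omega

def solution (trees : List Int) (M : Int) : Int :=
  bsA trees M 0 1000000000 0

-- ===== PORT B =====
-- Source B's prefix-sum table `pref` (the loop keeps a running sum and appends it: scanl).
def prefB (s : List Int) : List Int := List.scanl (· + ·) 0 s

-- Source B's `enough(v)`: `_bisect_right` is a verbatim textbook bisect.bisect_right,
-- ported as PySem.List.bisectRight (exact); `n - k` has k ≤ n in Python, written
-- here as Int subtraction of the casts (exact since bisectRight ≤ length).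
def detB (s : List Int) (M : Int) (v : Int) : Bool :=
  let k := PySem.List.bisectRight s v
  decide ((prefB s).getD s.length 0 - (prefB s).getD k 0 - v * ((s.length : Int) - (k : Int)) ≥ M)

-- Source B's bit-descent loop: `step` runs through 2^30, 2^29, …, 1; the step
-- counter is a nonnegative Python int, kept here as a Nat (`step >>= 1` = `/ 2`).
def descendB (s : List Int) (M : Int) (answer : Int) (step : Nat) : Int :=
  if step = 0 then answer
  else
    let nxt := answer + (step : Int)
    descendB s M (if nxt ≤ 1000000000 && detB s M nxt then nxt else answer) (step / 2)
termination_by step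
decreasing_by omega

def solution_alt (trees : List Int) (M : Int) : Int :=
  descendB (PySem.List.sorted trees id) M 0 1073741824

-- ===== PRECONDITION & SPEC =====
def Spec_solution (trees : List Int) (M : Int) (out : Int) : Prop := out = solution_alt trees M
instance (trees : List Int) (M : Int) (out : Int) : Decidable (Spec_solution trees M out) := by unfold Spec_solution; infer_instance

-- ===== CLAIM (what is proved, stated in full; the proofs are below) =====
def Claim_equal_solution : Prop := ∀ (trees : List Int) (M : Int), Dom_solution trees M → Spec_solution trees M (solution trees M)

-- ===== LEMMAS AND PROOFS =====

-- A's scan as a sum of per-tree contributions.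
lemma detA_foldl_sum (v : Int) : ∀ (l : List Int) (a : Int),
    l.foldl (fun total tree => if tree > v then total + (tree - v) else total) a
      = a + (l.map (fun t => if v < t then t - v else 0)).sum := by
  intro l
  induction l with
  | nil => simp
  | cons t l ih =>
      intro a
      simp only [List.foldl_cons, List.map_cons, List.sum_cons]
      split_ifs with h
      · rw [ih]; ring
      · rw [ih]; ring

-- harvested wood is antitone in the cut height, so detA is downward monotone
lemma detA_mono (trees : List Int) (M : Int) {v w : Int} (hvw : v ≤ w)
    (h : detA trees M w = true) : detA trees M v = true := by
  unfold detA at *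
  rw [detA_foldl_sum] at *
  simp only [decide_eq_true_eq, zero_add] at *
  refine le_trans h (List.sum_le_sum ?_)
  intro t _
  split_ifs <;> omega

-- subtracting v from every element of a list, summed
lemma sum_map_sub (l : List Int) (v : Int) :
    (l.map (fun t => t - v)).sum = l.sum - (l.length : Int) * v := by
  induction l with
  | nil => simp
  | cons t l ih =>
      simp only [List.map_cons, List.sum_cons, List.length_cons, ih]
      push_cast
      ring

-- the per-tree contribution sum, computed on the sorted list via the bisect index
lemma map_sum_eq_drop (s : List Int) (v : Int) (hs : List.Pairwise (· ≤ ·) s) :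
    (s.map (fun t => if v < t then t - v else 0)).sum
      = (s.drop (PySem.List.bisectRight s v)).sum
        - v * ((s.length : Int) - (PySem.List.bisectRight s v : Int)) := by
  obtain ⟨hk, hle, hgt⟩ := PySem.List.bisectRight_spec s v hs
  set k := PySem.List.bisectRight s v with hkdef
  have hsplit : s = s.take k ++ s.drop k := (List.take_append_drop k s).symm
  have htake : ∀ t ∈ s.take k, ¬ v < t := by
    intro t ht
    obtain ⟨i, hi, rfl⟩ := List.getElem_of_mem ht
    have hi' := hi
    simp only [List.length_take, lt_min_iff] at hi'
    rw [List.getElem_take]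
    exact not_lt.mpr (hle i hi'.2 hi'.1)
  have hdrop : ∀ t ∈ s.drop k, v < t := by
    intro t ht
    obtain ⟨i, hi, rfl⟩ := List.getElem_of_mem ht
    have hi' := hi
    simp only [List.length_drop] at hi'
    rw [List.getElem_drop]
    exact hgt (k + i) (by omega) (Nat.le_add_right _ _)
  conv_lhs => rw [hsplit]
  rw [List.map_append, List.sum_append]
  have h1 : (s.take k).map (fun t => if v < t then t - v else 0) = (s.take k).map (fun _ => 0) := by
    apply List.map_congr_left
    intro t ht; simp [htake t ht]
  have h2 : (s.drop k).map (fun t => if v < t then t - v else 0) = (s.drop k).map (fun t => t - v) := by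
    apply List.map_congr_left
    intro t ht; simp [hdrop t ht]
  rw [h1, h2, sum_map_sub]
  have hlen : (s.drop k).length = s.length - k := by simp
  have : ((s.drop k).length : Int) = (s.length : Int) - (k : Int) := by
    rw [hlen]; omega
  rw [this]
  simp [mul_comm]

-- prefix sums: the scanl table read at index k ≤ length is the sum of the first k elements
lemma prefB_getD (s : List Int) : ∀ (k : Nat) (a : Int), k ≤ s.length →
    (List.scanl (· + ·) a s).getD k 0 = a + (s.take k).sum := by
  induction s with
  | nil =>
      intro k a hk
      have : k = 0 := by simpa using hk
      subst this
      simp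
  | cons t l ih =>
      intro k a hk
      cases k with
      | zero => simp
      | succ k =>
          simp only [List.scanl_cons, List.getD_cons_succ, List.take_succ_cons, List.sum_cons]
          rw [ih k (a + t) (by simpa using hk)]
          ring

lemma prefB_len (s : List Int) : (prefB s).getD s.length 0 = s.sum := by
  have := prefB_getD s s.length 0 (le_refl _)
  simpa [prefB] using this

-- detB with its let binding evaluated (zeta reduction)
lemma detB_eval (s : List Int) (M v : Int) :
    detB s M v = decide ((prefB s).getD s.length 0 - (prefB s).getD (PySem.List.bisectRight s v) 0
      - v * ((s.length : Int) - (PySem.List.bisectRight s v : Int)) ≥ M) := rfl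

-- the two determinations agree for every cut height
lemma det_eq (trees : List Int) (M v : Int) :
    detA trees M v = detB (PySem.List.sorted trees id) M v := by
  set s := PySem.List.sorted trees id with hs
  have hperm : s.Perm trees := PySem.List.sorted_perm trees id false
  have hpair : List.Pairwise (· ≤ ·) s := PySem.List.sorted_pairwise trees id
  obtain ⟨hk, -, -⟩ := PySem.List.bisectRight_spec s v hpair
  set k := PySem.List.bisectRight s v with hkdef
  have hpref_k : (prefB s).getD k 0 = (s.take k).sum := by
    simpa [prefB] using prefB_getD s k 0 hk
  have hsum : (s.take k).sum + (s.drop k).sum = s.sum := by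
    rw [← List.sum_append, List.take_append_drop]
  have hmap : ((trees.map (fun t => if v < t then t - v else 0)).sum)
      = ((s.map (fun t => if v < t then t - v else 0)).sum) :=
    (List.Perm.sum_eq ((hperm.map _))).symm
  unfold detA
  rw [detA_foldl_sum, hmap, map_sum_eq_drop s v hpair, detB_eval, prefB_len, ← hkdef, hpref_k,
    decide_eq_decide]
  omega

-- unfolding descendB one step, with the let reduced
lemma descendB_step (s : List Int) (M a : Int) (step : Nat) (h : step ≠ 0) :
    descendB s M a step
      = descendB s M (if (decide (a + (step : Int) ≤ 1000000000) && detB s M (a + (step : Int))) = true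
          then a + (step : Int) else a) (step / 2) := by
  rw [descendB]
  simp [h]

lemma descendB_zero (s : List Int) (M a : Int) : descendB s M a 0 = a := by
  rw [descendB]; simp

-- either the probe a + s is admissible (≤ T) and taken, or it overshoots and is skipped
lemma descend_dichotomy (trees : List Int) (M T : Int) (hT : detA trees M T = true)
    (hmax : ∀ h, T < h → h ≤ 1000000000 → detA trees M h = false)
    (hTle : T ≤ 1000000000) (a s : Int) :
    ((decide (a + s ≤ 1000000000) && detB (PySem.List.sorted trees id) M (a + s)) = true ∧ a + s ≤ T)
    ∨ ((decide (a + s ≤ 1000000000) && detB (PySem.List.sorted trees id) M (a + s)) = false ∧ T < a + s) := by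
  by_cases hle : a + s ≤ T
  · left
    refine ⟨?_, hle⟩
    have hd : detA trees M (a + s) = true := detA_mono trees M hle hT
    rw [det_eq] at hd
    rw [Bool.and_eq_true, decide_eq_true_eq]
    exact ⟨by omega, hd⟩
  · right
    refine ⟨?_, by omega⟩
    cases hcv : (decide (a + s ≤ 1000000000) && detB (PySem.List.sorted trees id) M (a + s)) with
    | false => rfl
    | true =>
        rw [Bool.and_eq_true, decide_eq_true_eq] at hcv
        have := hmax (a + s) (by omega) hcv.1
        rw [det_eq, hcv.2] at this
        exact absurd this (by decide)

-- A's binary search returns the greatest admissible cut height T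
lemma bsA_eq_T (trees : List Int) (M T : Int) (hT : detA trees M T = true)
    (hmax : ∀ h, T < h → h ≤ 1000000000 → detA trees M h = false) :
    ∀ (left right answer : Int), right ≤ 1000000000 →
      ((T < left ∧ answer = T) ∨ (left ≤ T ∧ T ≤ right)) →
      bsA trees M left right answer = T := by
  intro left right answer
  fun_induction bsA trees M left right answer with
  | case1 l r a h mid hdet ih =>
      intro hr hinv
      have hmid := PySem.Int.floordiv_two_mid_bounds h
      have hmidT : mid ≤ T := by
        by_contra hc
        rw [hmax mid (by omega) (by omega)] at hdet
        exact absurd hdet (by decide)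
      apply ih hr
      omega
  | case2 l r a h mid hdet ih =>
      intro hr hinv
      have hmid := PySem.Int.floordiv_two_mid_bounds h
      have hTmid : T < mid := by
        by_contra hc
        rw [detA_mono trees M (by omega) hT] at hdet
        exact hdet rfl
      apply ih (by omega)
      omega
  | case3 l r a h =>
      intro hr hinv
      omega

-- if no wood can be harvested even at cut height 0, A's loop never moves `answer`
lemma bsA_none (trees : List Int) (M : Int) (h0 : detA trees M 0 = false) :
    ∀ (left right answer : Int), 0 ≤ left → bsA trees M left right answer = answer := by
  intro left right answer
  fun_induction bsA trees M left right answer with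
  | case1 l r a h mid hdet ih =>
      intro hl
      have hmid := PySem.Int.floordiv_two_mid_bounds h
      rw [detA_mono trees M (by omega : (0:Int) ≤ mid) hdet] at h0
      exact absurd h0 (by decide)
  | case2 l r a h mid hdet ih => exact ih
  | case3 l r a h => intro _; rfl

-- B's bit descent also returns T: invariant answer ≤ T < answer + 2·step
lemma descendB_eq_T (trees : List Int) (M T : Int) (hT : detA trees M T = true)
    (hmax : ∀ h, T < h → h ≤ 1000000000 → detA trees M h = false)
    (hTle : T ≤ 1000000000) :
    ∀ (k : Nat) (a : Int), a ≤ T → T < a + 2 ^ (k + 1) →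
      descendB (PySem.List.sorted trees id) M a (2 ^ k) = T := by
  intro k
  induction k with
  | zero =>
      intro a ha hub
      rw [descendB_step _ _ _ _ (by norm_num)]
      have e1 : (((2:Nat) ^ 0 : Nat) : Int) = 1 := by norm_num
      rw [e1] at *
      have e2 : (2:Nat) ^ 0 / 2 = 0 := by norm_num
      rw [e2, descendB_zero]
      rcases descend_dichotomy trees M T hT hmax hTle a 1 with ⟨hc, hle⟩ | ⟨hc, hgt⟩
      · rw [if_pos hc]
        have : T < a + 2 ^ (0 + 1) := hub
        norm_num at this
        omega
      · rw [if_neg (by rw [hc]; exact (by decide))]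
        omega
  | succ k ih =>
      intro a ha hub
      rw [descendB_step _ _ _ _ (by positivity)]
      have hstep : (2:Nat) ^ (k + 1) / 2 = 2 ^ k := by
        rw [pow_succ]; omega
      rw [hstep]
      have ecast : (((2:Nat) ^ (k + 1) : Nat) : Int) = 2 ^ (k + 1) := by push_cast; ring
      rw [ecast]
      have hpow : (2:Int) ^ (k + 1 + 1) = 2 * 2 ^ (k + 1) := by ring
      have hpos : (0:Int) < 2 ^ (k + 1) := by positivity
      rcases descend_dichotomy trees M T hT hmax hTle a ((2:Int) ^ (k + 1)) with ⟨hc, hle⟩ | ⟨hc, hgt⟩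
      · rw [if_pos hc]
        exact ih (a + 2 ^ (k + 1)) hle (by rw [hpow] at hub; omega)
      · rw [if_neg (by rw [hc]; exact (by decide))]
        exact ih a ha (by omega)

-- if no cut height works, B's descent never moves `answer` either
lemma descendB_none (trees : List Int) (M : Int) (h0 : detA trees M 0 = false) :
    ∀ (step : Nat) (a : Int), 0 ≤ a →
      descendB (PySem.List.sorted trees id) M a step = a := by
  intro step
  induction step using Nat.strong_induction_on with
  | _ step ih =>
      intro a ha
      by_cases h : step = 0
      · subst h; exact descendB_zero _ _ _
      · rw [descendB_step _ _ _ _ h]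
        have hd : detB (PySem.List.sorted trees id) M (a + (step : Int)) = false := by
          rw [← det_eq]
          cases hv : detA trees M (a + (step : Int)) with
          | false => rfl
          | true =>
              rw [detA_mono trees M (by omega : (0:Int) ≤ a + (step : Int)) hv] at h0
              exact absurd h0 (by decide)
        rw [hd]
        simp only [Bool.and_false]
        rw [if_neg (by decide)]
        exact ih (step / 2) (by omega) a ha

-- ===== VERDICT (by name: the statement is the Claim_ definition above) =====
theorem solution_spec : Claim_equal_solution := by
  intro trees M _
  unfold Spec_solution solution solution_alt
  by_cases h0 : detA trees M 0 = true
  · -- a greatest admissible cut height T exists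
    obtain ⟨T, hTP, hTmax⟩ := Int.exists_greatest_of_bdd
      (P := fun h => 0 ≤ h ∧ h ≤ 1000000000 ∧ detA trees M h = true)
      ⟨1000000000, fun z hz => hz.2.1⟩ ⟨0, le_refl 0, by norm_num, h0⟩
    obtain ⟨hT0, hTle, hTdet⟩ := hTP
    have hmax : ∀ h, T < h → h ≤ 1000000000 → detA trees M h = false := by
      intro h hTh hle
      by_contra hb
      rw [Bool.not_eq_false] at hb
      have := hTmax h ⟨by omega, hle, hb⟩
      omega
    rw [bsA_eq_T trees M T hTdet hmax 0 1000000000 0 (le_refl _) (by omega)]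
    have h30 : (1073741824 : Nat) = 2 ^ 30 := by norm_num
    rw [h30, descendB_eq_T trees M T hTdet hmax hTle 30 0 hT0 (by norm_num; omega)]
  · rw [Bool.not_eq_true] at h0
    rw [bsA_none trees M h0 0 1000000000 0 (le_refl _),
      descendB_none trees M h0 1073741824 0 (le_refl _)]
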